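-- pv_equiv track=rewrite | github.com/jsh9/pydoclint | pydoclint/utils/generic.py | specialEqual
-- ===== SOURCE A (Python) =====
-- def specialEqual(str1: str, str2: str) -> bool:
--     """
--     Check string equality but treat any single quotes as the same as
--     double quotes, and ignore line breaks in either strings, and also
--     ignore any in-line comments in either string.
--     """
--     if str1 == str2:
--         return True  # using shortcuts to speed up evaluation
--
--     # Remove inline comments (everything after #).
--     # Note: str.partition() is faster than str.split() in this case.
--     if '#' in str1:
--         str1 = str1.partition('#')[0].rstrip()
--
--     if '#' in str2:
--         str2 = str2.partition('#')[0].rstrip()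
--
--     if '\n' in str1 or '\n' in str2:
--         str1 = str1.replace(' ', '').replace('\n', '')
--         str2 = str2.replace(' ', '').replace('\n', '')
--
--     if len(str1) != len(str2):
--         return False  # using shortcuts to speed up evaluation
--
--     quotes = {'"', "'"}
--     for char1, char2 in zip(str1, str2):
--         if char1 == char2:
--             continue
--
--         if char1 in quotes and char2 in quotes:
--             continue
--
--         return False
--
--     return True
-- ===== SOURCE B (Python) =====
-- def specialEqual(str1: str, str2: str) -> bool:
--     # drop an inline comment (and trailing whitespace before it), as pydoclint does
--     t1 = str1.partition('#')[0].rstrip() if '#' in str1 else str1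
--     t2 = str2.partition('#')[0].rstrip() if '#' in str2 else str2
--
--     # spaces/newlines are ignored only when either string is multi-line
--     skip = '\n' in t1 or '\n' in t2
--
--     # single fused two-pointer scan: no normalized strings are built, no
--     # length pre-check; quote characters compare as equal to each other
--     quotes = '"\''
--     n1, n2 = len(t1), len(t2)
--     i = j = 0
--     while True:
--         if skip:
--             while i < n1 and t1[i] in ' \n':
--                 i += 1
--             while j < n2 and t2[j] in ' \n':
--                 j += 1
--         if i == n1 or j == n2:
--             return i == n1 and j == n2
--         c1, c2 = t1[i], t2[j]
--         if c1 != c2 and not (c1 in quotes and c2 in quotes):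
--             return False
--         i += 1
--         j += 1
-- ===== Notes on version B (the rewrite author's own statement) =====
-- stated objective: alternative
-- what changed: B replaces A's staged pipeline (two whitespace-replace passes building normalized strings, a length pre-check, then a zip loop) with a single fused two-pointer scan over the comment-stripped strings that skips ignorable spaces/newlines on the fly and compares characters quote-insensitively, building no intermediate strings.
import Mathlib
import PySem

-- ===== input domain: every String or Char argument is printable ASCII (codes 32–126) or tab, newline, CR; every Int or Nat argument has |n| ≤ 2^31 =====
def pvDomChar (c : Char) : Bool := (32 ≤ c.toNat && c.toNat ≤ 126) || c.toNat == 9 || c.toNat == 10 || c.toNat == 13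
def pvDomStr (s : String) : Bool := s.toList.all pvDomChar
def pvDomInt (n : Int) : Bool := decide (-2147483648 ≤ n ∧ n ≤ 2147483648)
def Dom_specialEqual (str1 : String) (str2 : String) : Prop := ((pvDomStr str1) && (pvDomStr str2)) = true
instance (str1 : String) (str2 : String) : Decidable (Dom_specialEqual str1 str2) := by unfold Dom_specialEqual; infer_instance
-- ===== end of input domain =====

-- B fuses A's two whitespace-replace passes, length pre-check and zip loop into one
-- two-pointer scan that skips ignorable characters on the fly and builds no
-- normalized strings; objective: alternative (same linear cost, no intermediate strings).

-- s.partition('#')[0] on a list of chars (exact: the part before the first '#'; only used when '#' is present)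
def pvPartHead (cs : List Char) : List Char := cs.takeWhile (fun c => c ≠ '#')

-- ===== PORT A =====
def pvQuotes : PySem.Set Char := PySem.Set.ofList ['"', '\'']

-- str.replace(' ', '').replace('\n', '') as A performs it
def pvStripWs (cs : List Char) : List Char :=
  PySem.Chars.replace (PySem.Chars.replace cs [' '] []) ['\n'] []

def pvLoopA : List (Char × Char) → Bool
  | [] => true
  | (c1, c2) :: rest =>
    if c1 = c2 then pvLoopA rest
    else if pvQuotes.contains c1 && pvQuotes.contains c2 then pvLoopA rest
    else false

def specialEqual (str1 : String) (str2 : String) : Bool :=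
  if str1 == str2 then true
  else
    let s1 := str1.toList
    let s2 := str2.toList
    let s1 := if PySem.Chars.isIn ['#'] s1 then PySem.Chars.rstrip (pvPartHead s1) else s1
    let s2 := if PySem.Chars.isIn ['#'] s2 then PySem.Chars.rstrip (pvPartHead s2) else s2
    let p := if PySem.Chars.isIn ['\n'] s1 || PySem.Chars.isIn ['\n'] s2
             then (pvStripWs s1, pvStripWs s2) else (s1, s2)
    if p.1.length ≠ p.2.length then false
    else pvLoopA (p.1.zip p.2)

-- ===== PORT B =====
-- t = s.partition('#')[0].rstrip() if '#' in s else s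
def pvStripComment (cs : List Char) : List Char :=
  if PySem.Chars.isIn ['#'] cs then PySem.Chars.rstrip (pvPartHead cs) else cs

-- c in ' \n'
def pvIsWsNl (c : Char) : Bool := c = ' ' || c = '\n'

-- c in '"\''
def pvIsQuote (c : Char) : Bool := c = '"' || c = '\''

-- the two-pointer while-loop of Source B: the pointers are represented as the
-- unread suffixes of the two strings; the inner skip-whiles are dropWhile
def pvScan (skip : Bool) (xs ys : List Char) : Bool :=
  match hx : (if skip then xs.dropWhile pvIsWsNl else xs),
        hy : (if skip then ys.dropWhile pvIsWsNl else ys) with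
  | [], [] => true
  | [], _ :: _ => false
  | _ :: _, [] => false
  | c1 :: xt, c2 :: yt =>
    if c1 ≠ c2 ∧ ¬ (pvIsQuote c1 && pvIsQuote c2) then false
    else pvScan skip xt yt
termination_by xs.length + ys.length
decreasing_by
  have h1 : (c1 :: xt).length ≤ xs.length := by
    rw [← hx]; split
    · exact List.length_dropWhile_le _ _
    · exact le_refl _
  have h2 : (c2 :: yt).length ≤ ys.length := by
    rw [← hy]; split
    · exact List.length_dropWhile_le _ _
    · exact le_refl _
  simp only [List.length_cons] at h1 h2
  omega

def specialEqual_alt (str1 : String) (str2 : String) : Bool :=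
  let t1 := pvStripComment str1.toList
  let t2 := pvStripComment str2.toList
  let skip := PySem.Chars.isIn ['\n'] t1 || PySem.Chars.isIn ['\n'] t2
  pvScan skip t1 t2

-- ===== PRECONDITION & SPEC =====
def Spec_specialEqual (str1 : String) (str2 : String) (out : Bool) : Prop := out = specialEqual_alt str1 str2
instance (str1 : String) (str2 : String) (out : Bool) : Decidable (Spec_specialEqual str1 str2 out) := by unfold Spec_specialEqual; infer_instance

-- ===== CLAIM =====
def Claim_equal_specialEqual : Prop := ∀ (str1 : String) (str2 : String), Dom_specialEqual str1 str2 → Spec_specialEqual str1 str2 (specialEqual str1 str2)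

-- ===== LEMMAS AND PROOFS =====

-- canonicalization used only in the proof: both quote characters map to '"'
def pvCanon (c : Char) : Char := if c = '\'' then '"' else c

-- characters kept by the whitespace-stripping passes
def pvKeep (c : Char) : Bool := !pvIsWsNl c

theorem pvQuotes_contains (c : Char) : pvQuotes.contains c = pvIsQuote c := by
  have h : pvQuotes = ['"', '\''] := rfl
  simp [h, PySem.Set.contains, pvIsQuote]

theorem pvCanon_eq_iff (c1 c2 : Char) :
    (pvCanon c1 = pvCanon c2) ↔ (c1 = c2 ∨ (pvIsQuote c1 && pvIsQuote c2) = true) := by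
  unfold pvCanon pvIsQuote
  by_cases h1 : c1 = '\'' <;> by_cases h2 : c2 = '\'' <;> simp [h1, h2]
  · constructor
    · intro h; right; exact h.symm
    · rintro (h | h)
      · exact absurd h.symm h2
      · exact h.symm
  · intro ha hb; rw [ha, hb]

-- A's zip loop on equal-length lists decides equality of the quote-canonicalized lists
theorem pvLoopA_eq_canon : ∀ (a b : List Char), a.length = b.length →
    pvLoopA (a.zip b) = (a.map pvCanon == b.map pvCanon) := by
  intro a
  induction a with
  | nil =>
    intro b hb
    cases b with
    | nil => rfl
    | cons _ _ => simp at hb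
  | cons c1 a ih =>
    intro b hb
    cases b with
    | nil => simp at hb
    | cons c2 b =>
      simp only [List.length_cons, Nat.add_right_cancel_iff] at hb
      rw [List.zip_cons_cons]
      by_cases h : c1 = c2
      · subst h
        simp [pvLoopA, ih b hb, List.cons_beq_cons]
      · rw [pvLoopA, if_neg h]
        by_cases hq : (pvQuotes.contains c1 && pvQuotes.contains c2) = true
        · rw [if_pos hq, ih b hb]
          have hc : pvCanon c1 = pvCanon c2 := by
            apply (pvCanon_eq_iff c1 c2).mpr
            right
            rwa [pvQuotes_contains, pvQuotes_contains] at hq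
          simp [List.cons_beq_cons, hc]
        · rw [if_neg hq]
          have hc : pvCanon c1 ≠ pvCanon c2 := by
            intro e
            rcases (pvCanon_eq_iff c1 c2).mp e with h' | h'
            · exact h h'
            · exact hq (by rwa [pvQuotes_contains, pvQuotes_contains])
          simp [List.cons_beq_cons, hc]

-- the final comparison step of A equals canonicalized equality of the processed strings
theorem pvFinal_eq (p : List Char × List Char) :
    (if p.1.length ≠ p.2.length then false else pvLoopA (p.1.zip p.2)) =
      (p.1.map pvCanon == p.2.map pvCanon) := by
  by_cases hl : p.1.length = p.2.length
  · rw [if_neg (not_not_intro hl)]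
    exact pvLoopA_eq_canon _ _ hl
  · rw [if_pos hl]
    symm
    rw [beq_eq_false_iff_ne]
    intro hmap
    exact hl (by simpa using congrArg List.length hmap)

-- str.replace(x, '') with enough fuel is a filter
theorem pvGo_filter (x : Char) : ∀ (fuel : Nat) (l acc : List Char), l.length ≤ fuel →
    PySem.Chars.replace.go [x] [] fuel l acc = acc.reverse ++ l.filter (fun c => c != x) := by
  intro fuel
  induction fuel with
  | zero =>
    intro l acc h
    have : l = [] := List.eq_nil_of_length_eq_zero (Nat.le_zero.mp h)
    subst this
    simp [PySem.Chars.replace.go]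
  | succ n ih =>
    intro l acc h
    cases l with
    | nil => simp [PySem.Chars.replace.go]
    | cons c t =>
      simp only [List.length_cons, Nat.succ_le_succ_iff] at h
      rw [PySem.Chars.replace.go]
      by_cases hc : c = x
      · subst hc
        simp only [List.isPrefixOf, beq_self_eq_true, Bool.true_and, if_true, List.length_cons,
          List.length_nil, List.drop_succ_cons, List.drop_zero, List.reverse_nil, List.nil_append]
        rw [ih t acc h]
        simp [List.filter]
      · have hx : (x == c) = false := by simp; exact fun e => hc e.symm
        simp only [List.isPrefixOf, hx, Bool.false_and, Bool.false_eq_true, if_false]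
        rw [ih t (c :: acc) h]
        have ht : (c != x) = true := by simp [bne_iff_ne]; exact hc
        simp [List.filter, ht]

theorem pvReplace_single_empty (x : Char) (cs : List Char) :
    PySem.Chars.replace cs [x] [] = cs.filter (fun c => c != x) := by
  rw [PySem.Chars.replace]
  simp only [List.isEmpty]
  exact pvGo_filter x cs.length cs [] (le_refl _)

theorem pvStripWs_eq_filter (cs : List Char) :
    pvStripWs cs = cs.filter pvKeep := by
  unfold pvStripWs
  rw [pvReplace_single_empty, pvReplace_single_empty, List.filter_filter]
  apply List.filter_congr
  intro c _
  simp [pvKeep, pvIsWsNl, bne, Bool.and_comm]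
  rfl

theorem pvFilter_keep_dropWhile (cs : List Char) :
    (cs.dropWhile pvIsWsNl).filter pvKeep = cs.filter pvKeep := by
  induction cs with
  | nil => rfl
  | cons c t ih =>
    by_cases h : pvIsWsNl c = true
    · simp [List.dropWhile, h, List.filter, pvKeep, ih]
    · simp only [Bool.not_eq_true] at h
      simp [List.dropWhile, h, List.filter, pvKeep]

theorem pvDropWhile_head {p : Char → Bool} {l t : List Char} {c : Char}
    (h : l.dropWhile p = c :: t) : p c = false := by
  have := List.head?_dropWhile_not p l
  rw [h] at this
  simpa using this

-- filtering commutes with the per-iteration skip of pvScan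
theorem pvF_eq (skip : Bool) (l l' : List Char)
    (h : (if skip then l.dropWhile pvIsWsNl else l) = l') :
    (if skip then l.filter pvKeep else l) =
      (if skip then l'.filter pvKeep else l') := by
  cases skip
  · simpa using h
  · simp only [if_true] at h ⊢
    rw [← h, pvFilter_keep_dropWhile]

theorem pvF_cons (skip : Bool) (l xt : List Char) (c : Char)
    (h : (if skip then l.dropWhile pvIsWsNl else l) = c :: xt) :
    (if skip then l.filter pvKeep else l) =
      c :: (if skip then xt.filter pvKeep else xt) := by
  rw [pvF_eq skip l _ h]
  cases skip
  · simp
  · have hc : pvIsWsNl c = false := pvDropWhile_head (by simpa using h)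
    simp [List.filter, pvKeep, hc]

-- the fused scan decides canonicalized equality of the (possibly filtered) lists
theorem pvScan_eq (skip : Bool) (xs ys : List Char) :
    pvScan skip xs ys =
      ((if skip then xs.filter pvKeep else xs).map pvCanon ==
       (if skip then ys.filter pvKeep else ys).map pvCanon) := by
  induction xs, ys using pvScan.induct skip with
  | case1 xs ys hx hy =>
    rw [pvScan]
    simp only [dite_eq_ite] at hx hy
    rw [hx, hy]
    change true = _
    rw [pvF_eq skip xs _ hx, pvF_eq skip ys _ hy]
    cases skip <;> simp
  | case2 xs ys c t hx hy =>
    rw [pvScan]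
    simp only [dite_eq_ite] at hx hy
    rw [hx, hy]
    change false = _
    rw [pvF_eq skip xs _ hx, pvF_cons skip ys t c hy]
    cases skip <;> simp
  | case3 xs ys c t hx hy =>
    rw [pvScan]
    simp only [dite_eq_ite] at hx hy
    rw [hx, hy]
    change false = _
    rw [pvF_cons skip xs t c hx, pvF_eq skip ys _ hy]
    cases skip <;> simp
  | case4 xs ys c1 xt c2 yt hx hy hcond =>
    rw [pvScan]
    simp only [dite_eq_ite] at hx hy
    rw [hx, hy]
    change (if c1 ≠ c2 ∧ ¬ (pvIsQuote c1 && pvIsQuote c2) = true then false else pvScan skip xt yt) = _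
    rw [pvF_cons skip xs xt c1 hx, pvF_cons skip ys yt c2 hy]
    rw [if_pos hcond]
    have hne : pvCanon c1 ≠ pvCanon c2 := by
      intro e
      rcases (pvCanon_eq_iff c1 c2).mp e with h | h
      · exact hcond.1 h
      · exact hcond.2 h
    simp [List.map, hne]
  | case5 xs ys c1 xt c2 yt hx hy hcond ih =>
    rw [pvScan]
    simp only [dite_eq_ite] at hx hy
    rw [hx, hy]
    change (if c1 ≠ c2 ∧ ¬ (pvIsQuote c1 && pvIsQuote c2) = true then false else pvScan skip xt yt) = _
    rw [pvF_cons skip xs xt c1 hx, pvF_cons skip ys yt c2 hy]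
    rw [if_neg hcond]
    have heq : pvCanon c1 = pvCanon c2 := by
      apply (pvCanon_eq_iff c1 c2).mpr
      by_cases h : c1 = c2
      · exact Or.inl h
      · right
        rcases not_and_or.mp hcond with h' | h'
        · exact absurd h (not_not.mp (by simpa using h'))
        · simpa using h'
    simp [List.map, heq, ih]

-- A's tail (after the shortcut) equals B
theorem pvBody (t1 t2 : List Char) :
    (if (if (PySem.Chars.isIn ['\n'] t1 || PySem.Chars.isIn ['\n'] t2) then (pvStripWs t1, pvStripWs t2) else (t1, t2)).1.length ≠
        (if (PySem.Chars.isIn ['\n'] t1 || PySem.Chars.isIn ['\n'] t2) then (pvStripWs t1, pvStripWs t2) else (t1, t2)).2.length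
      then false
      else pvLoopA ((if (PySem.Chars.isIn ['\n'] t1 || PySem.Chars.isIn ['\n'] t2) then (pvStripWs t1, pvStripWs t2) else (t1, t2)).1.zip
        (if (PySem.Chars.isIn ['\n'] t1 || PySem.Chars.isIn ['\n'] t2) then (pvStripWs t1, pvStripWs t2) else (t1, t2)).2))
    = pvScan (PySem.Chars.isIn ['\n'] t1 || PySem.Chars.isIn ['\n'] t2) t1 t2 := by
  rw [pvScan_eq]
  cases hs : (PySem.Chars.isIn ['\n'] t1 || PySem.Chars.isIn ['\n'] t2)
  · simp only [if_false, Bool.false_eq_true]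
    exact pvFinal_eq (t1, t2)
  · simp only [if_true]
    have h := pvFinal_eq (pvStripWs t1, pvStripWs t2)
    simpa [pvStripWs_eq_filter] using h

-- ===== VERDICT =====
theorem specialEqual_spec : Claim_equal_specialEqual := by
  intro str1 str2 _
  unfold Spec_specialEqual specialEqual
  by_cases he : (str1 == str2) = true
  · have hval : str1 = str2 := by simpa using he
    subst hval
    rw [if_pos he]
    show true = specialEqual_alt str1 str1
    unfold specialEqual_alt
    rw [pvScan_eq]
    exact (beq_self_eq_true _).symm
  · rw [if_neg he]
    show _ = specialEqual_alt str1 str2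
    unfold specialEqual_alt pvStripComment
    exact pvBody _ _
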